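-- pv_equiv track=rewrite | github.com/AITech-Team/AITech-Toolkit | modules/document_interpretation.py | parse_inline_formatting
-- ===== SOURCE A (Python) =====
-- def parse_inline_formatting(text):
--     """解析内联格式（粗体、斜体等）"""
--     parts = []
--     current_pos = 0
--
--     # 查找粗体标记 **text**
--     while current_pos < len(text):
--         bold_start = text.find('**', current_pos)
--         if bold_start == -1:
--             if current_pos < len(text):
--                 parts.append(('normal', text[current_pos:]))
--             break
--
--         # 添加粗体标记前的普通文本
--         if bold_start > current_pos:
--             parts.append(('normal', text[current_pos:bold_start]))
--
--         # 查找粗体结束标记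
--         bold_end = text.find('**', bold_start + 2)
--         if bold_end == -1:
--             parts.append(('normal', text[bold_start:]))
--             break
--
--         # 添加粗体文本
--         bold_text = text[bold_start + 2:bold_end]
--         if bold_text:
--             parts.append(('bold', bold_text))
--
--         current_pos = bold_end + 2
--
--     return parts
-- ===== SOURCE B (Python) =====
-- def parse_inline_formatting(text):
--     segments = text.split('**')
--     last = len(segments) - 1
--     parts = []
--     for i, seg in enumerate(segments):
--         if i % 2 == 1 and i == last:
--             # odd number of '**' markers: the final opening marker was never closed
--             parts.append(('normal', '**' + seg))
--         elif seg:
--             parts.append(('bold' if i % 2 == 1 else 'normal', seg))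
--     return parts
-- ===== Notes on version B (the rewrite author's own statement) =====
-- stated objective: simpler
-- what changed: A's while-loop that repeatedly calls text.find for the next double-asterisk marker and slices out pieces is replaced by one split on the double-asterisk delimiter followed by a single enumerate pass: even segments are normal, odd segments are bold, and an odd-indexed final segment means an unclosed marker, re-emitted as normal text with the marker prepended.
import Mathlib
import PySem

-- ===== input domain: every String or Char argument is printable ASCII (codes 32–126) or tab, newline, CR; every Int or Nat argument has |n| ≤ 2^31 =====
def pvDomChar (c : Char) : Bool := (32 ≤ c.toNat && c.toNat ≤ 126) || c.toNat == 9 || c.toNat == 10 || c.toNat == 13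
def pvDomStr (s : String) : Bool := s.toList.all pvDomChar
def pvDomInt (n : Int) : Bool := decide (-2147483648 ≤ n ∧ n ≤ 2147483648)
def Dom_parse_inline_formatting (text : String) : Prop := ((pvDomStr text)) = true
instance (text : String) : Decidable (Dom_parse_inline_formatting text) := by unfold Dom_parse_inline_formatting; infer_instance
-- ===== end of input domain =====

-- B replaces A's find-based scanning while-loop by a single split on '**' followed by one
-- pass with even/odd parity (objective: simpler decomposition, same exact results).

-- ===== PORT A =====
-- while-loop of A as a fuel-bounded recursion; each iteration advances current_pos by ≥ 2,
-- so fuel = len(text) + 1 never runs out on the loop's own steps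
def pifA_go (s : List Char) (pos fuel : Nat) (parts : List (String × String)) : List (String × String) :=
  match fuel with
  | 0 => parts
  | fuel + 1 =>
    if pos < s.length then
      let bold_start := PySem.Chars.findFrom s ['*','*'] (pos : Int)
      if bold_start = -1 then
        (if pos < s.length then
          parts ++ [("normal", String.ofList (PySem.Chars.slice s (some (pos : Int)) none))]
        else parts)
      else
        let parts := if (pos : Int) < bold_start then
            parts ++ [("normal", String.ofList (PySem.Chars.slice s (some (pos : Int)) (some bold_start)))]
          else parts
        let bold_end := PySem.Chars.findFrom s ['*','*'] (bold_start + 2)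
        if bold_end = -1 then
          parts ++ [("normal", String.ofList (PySem.Chars.slice s (some bold_start) none))]
        else
          let bold_text := PySem.Chars.slice s (some (bold_start + 2)) (some bold_end)
          let parts := if bold_text ≠ [] then parts ++ [("bold", String.ofList bold_text)] else parts
          pifA_go s (bold_end + 2).toNat fuel parts
    else parts

def parse_inline_formatting (text : String) : List (String × String) :=
  pifA_go text.toList 0 (text.toList.length + 1) []

-- ===== PORT B =====
def pifB_step (last : Int) (parts : List (String × String)) (iseg : Int × List Char) : List (String × String) :=
  if PySem.Int.mod iseg.1 2 = 1 ∧ iseg.1 = last then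
    parts ++ [("normal", String.ofList ('*' :: '*' :: iseg.2))]
  else if iseg.2 ≠ [] then
    parts ++ [((if PySem.Int.mod iseg.1 2 = 1 then "bold" else "normal"), String.ofList iseg.2)]
  else parts

def parse_inline_formatting_alt (text : String) : List (String × String) :=
  let segments := PySem.Chars.splitOn text.toList ['*','*']
  (PySem.List.enumerate segments).foldl (pifB_step ((segments.length : Int) - 1)) []

-- ===== PRECONDITION & SPEC =====
def Spec_parse_inline_formatting (text : String) (out : List (String × String)) : Prop := out = parse_inline_formatting_alt text
instance (text : String) (out : List (String × String)) : Decidable (Spec_parse_inline_formatting text out) := by unfold Spec_parse_inline_formatting; infer_instance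

-- ===== CLAIM (what is proved, stated in full; the proofs are below) =====
def Claim_equal_parse_inline_formatting : Prop := ∀ (text : String), Dom_parse_inline_formatting text → Spec_parse_inline_formatting text (parse_inline_formatting text)

-- ===== LEMMAS AND PROOFS =====

def splitRef : List Char → List (List Char)
  | [] => [[]]
  | c :: rest =>
    if ['*','*'].isPrefixOf (c :: rest) then [] :: splitRef (rest.drop 1)
    else (splitRef rest).modifyHead (c :: ·)
termination_by l => l.length
decreasing_by all_goals simp

lemma modifyHead_id_fun (L : List (List Char)) :
    L.modifyHead (fun x => x) = L := by
  cases L <;> simp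

lemma splitOn_go_eq (fuel : Nat) : ∀ (l cur : List Char) (acc : List (List Char)),
    l.length < fuel →
    PySem.Chars.splitOn.go ['*','*'] fuel l cur acc
      = acc.reverse ++ (splitRef l).modifyHead (cur.reverse ++ ·) := by
  induction fuel with
  | zero => intro l cur acc h; omega
  | succ fuel ih =>
    intro l cur acc h
    cases l with
    | nil =>
      rw [PySem.Chars.splitOn.go]
      · simp [splitRef]
      · simp
    | cons c rest =>
      rw [PySem.Chars.splitOn.go]
      by_cases hp : ['*','*'].isPrefixOf (c :: rest)
      · simp only [hp, if_true]
        rw [show (['*','*'] : List Char).length = 2 from rfl]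
        rw [ih (List.drop 2 (c :: rest)) [] (cur.reverse :: acc) (by simp at h ⊢; omega)]
        rw [splitRef]
        simp [hp, modifyHead_id_fun]
      · simp only [hp, Bool.false_eq_true, if_false]
        rw [ih rest (c :: cur) acc (by simp at h ⊢; omega)]
        rw [splitRef]
        simp only [hp, Bool.false_eq_true, if_false]
        rw [List.modifyHead_modifyHead]
        congr 1
        congr 1
        funext x
        simp

lemma splitOn_eq_splitRef (l : List Char) :
    PySem.Chars.splitOn l ['*','*'] = splitRef l := by
  rw [PySem.Chars.splitOn, splitOn_go_eq (l.length + 1) l [] [] (by omega)]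
  simp [modifyHead_id_fun]

lemma find_go_shift (l : List Char) (k : Nat) :
    PySem.Chars.find.go ['*','*'] l k
      = if PySem.Chars.find.go ['*','*'] l 0 = -1 then -1
        else PySem.Chars.find.go ['*','*'] l 0 + k := by
  induction l generalizing k with
  | nil => simp [PySem.Chars.find.go]
  | cons c t ih =>
    rw [PySem.Chars.find.go]
    rw [show PySem.Chars.find.go ['*','*'] (c :: t) 0
        = if ['*','*'].isPrefixOf (c :: t) then (0:Int) else PySem.Chars.find.go ['*','*'] t 1
      from by rw [PySem.Chars.find.go]; simp]
    by_cases h : ['*','*'].isPrefixOf (c :: t)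
    · simp [h]
    · simp only [h, Bool.false_eq_true, if_false]
      rw [ih (k+1), ih 1]
      have hnn : -1 ≤ PySem.Chars.find.go ['*','*'] t 0 := by
        have := PySem.Chars.neg_one_le_find t ['*','*']
        simpa [PySem.Chars.find] using this
      by_cases h0 : PySem.Chars.find.go ['*','*'] t 0 = -1
      · simp [h0]
      · have hne : ¬ (PySem.Chars.find.go ['*','*'] t 0 + 1 = -1) := by omega
        simp only [h0, hne, if_false]
        push_cast
        omega

lemma find_of_prefix {l : List Char} (h : ['*','*'].isPrefixOf l = true) :
    PySem.Chars.find l ['*','*'] = 0 := by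
  cases l with
  | nil => simp at h
  | cons c t => simp [PySem.Chars.find, PySem.Chars.find.go, h]

lemma find_cons {c : Char} {t : List Char} (h : ¬ ['*','*'].isPrefixOf (c :: t) = true) :
    PySem.Chars.find (c :: t) ['*','*']
      = if PySem.Chars.find t ['*','*'] = -1 then -1 else PySem.Chars.find t ['*','*'] + 1 := by
  simp only [PySem.Chars.find]
  rw [PySem.Chars.find.go]
  simp only [h, Bool.false_eq_true, if_false]
  exact find_go_shift t 1

lemma splitRef_eq_find (l : List Char) :
    splitRef l =
      if PySem.Chars.find l ['*','*'] = -1 then [l]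
      else l.take (PySem.Chars.find l ['*','*']).toNat
        :: splitRef (l.drop ((PySem.Chars.find l ['*','*']).toNat + 2)) := by
  induction l using splitRef.induct with
  | case1 =>
    have : PySem.Chars.find ([] : List Char) ['*','*'] = -1 := by decide
    simp [splitRef, this]
  | case2 c rest hp ih =>
    rw [find_of_prefix hp]
    rw [splitRef]
    simp [hp]
  | case3 c rest hp ih =>
    rw [splitRef]
    simp only [hp, Bool.false_eq_true, if_false]
    rw [find_cons hp, ih]
    have hnn : -1 ≤ PySem.Chars.find rest ['*','*'] := PySem.Chars.neg_one_le_find rest ['*','*']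
    by_cases h0 : PySem.Chars.find rest ['*','*'] = -1
    · simp [h0]
    · have hge : 0 ≤ PySem.Chars.find rest ['*','*'] := by omega
      have hne : ¬ (PySem.Chars.find rest ['*','*'] + 1 = -1) := by omega
      simp only [h0, hne, if_false]
      have ht : (PySem.Chars.find rest ['*','*'] + 1).toNat
          = (PySem.Chars.find rest ['*','*']).toNat + 1 := by omega
      rw [ht]
      simp

lemma splitRef_ne_nil (l : List Char) : splitRef l ≠ [] := by
  induction l using splitRef.induct with
  | case1 => simp [splitRef]
  | case2 c rest hp ih => rw [splitRef]; simp [hp]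
  | case3 c rest hp ih =>
    rw [splitRef]
    simp only [hp, Bool.false_eq_true, if_false]
    cases h : splitRef rest with
    | nil => exact absurd h ih
    | cons a t => simp

def segParts : List (List Char) → List (String × String)
  | [] => []
  | [t] => if t ≠ [] then [("normal", String.ofList t)] else []
  | [s0, r] =>
    (if s0 ≠ [] then [("normal", String.ofList s0)] else []) ++
      [("normal", String.ofList ('*' :: '*' :: r))]
  | s0 :: s1 :: s2 :: segs =>
    (if s0 ≠ [] then [("normal", String.ofList s0)] else []) ++
    (if s1 ≠ [] then [("bold", String.ofList s1)] else []) ++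
    segParts (s2 :: segs)

lemma take_ne_nil_iff {t : List Char} (ht : t ≠ []) (i : Nat) : t.take i ≠ [] ↔ 0 < i := by
  cases t with
  | nil => simp at ht
  | cons a u => cases i <;> simp

lemma find_prefix_decomp {t : List Char} {i : Nat}
    (h : PySem.Chars.find t ['*','*'] = (i : Int)) :
    t.drop i = '*' :: '*' :: t.drop (i + 2) ∧ i + 2 ≤ t.length := by
  have h0 : (0:Int) ≤ PySem.Chars.find t ['*','*'] := by rw [h]; positivity
  have hsp := (PySem.Chars.find_spec (s := t) (sub := ['*','*']) h0).1
  rw [h] at hsp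
  simp only [Int.toNat_natCast] at hsp
  obtain ⟨u, hu⟩ := hsp
  have hlen : i ≤ t.length := by
    have := PySem.Chars.find_le_length t ['*','*']
    rw [h] at this; exact_mod_cast this
  have hdd : t.drop (i + 2) = (t.drop i).drop 2 := by
    rw [List.drop_drop]
  have hd2 : (t.drop i).drop 2 = u := by rw [← hu]; simp
  constructor
  · rw [hdd, hd2]
    exact hu.symm
  · have hc := congrArg List.length hu
    simp at hc
    omega

lemma pifA_go_eq (fuel : Nat) : ∀ (s : List Char) (pos : Nat) (parts : List (String × String)),
    s.length - pos < fuel → pos ≤ s.length →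
    pifA_go s pos fuel parts = parts ++ segParts (splitRef (s.drop pos)) := by
  induction fuel with
  | zero => intro s pos parts h hle; omega
  | succ fuel ih =>
    intro s pos parts h hle
    rw [pifA_go]
    by_cases hlt : pos < s.length
    · simp only [hlt, if_true]
      rw [PySem.Chars.findFrom_natCast s ['*','*'] pos (by omega)]
      have htne : s.drop pos ≠ [] := by
        intro hnil
        have := congrArg List.length hnil
        simp at this; omega
      by_cases hf : PySem.Chars.find (s.drop pos) ['*','*'] = -1
      · rw [splitRef_eq_find]
        simp only [hf, if_true]
        simp [segParts, htne, PySem.List.slice_from_natCast]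
      · have h0 : (0:Int) ≤ PySem.Chars.find (s.drop pos) ['*','*'] := by
          have := PySem.Chars.neg_one_le_find (s.drop pos) ['*','*']
          omega
        obtain ⟨i, hi⟩ : ∃ i : Nat, PySem.Chars.find (s.drop pos) ['*','*'] = (i : Int) :=
          ⟨_, (Int.toNat_of_nonneg h0).symm⟩
        simp only [hf, if_false]
        rw [hi]
        have hne1 : ¬ ((pos : Int) + (i : Int) = -1) := by omega
        simp only [hne1, if_false]
        obtain ⟨hdec, hlen2⟩ := find_prefix_decomp hi
        have hlen : i + 2 ≤ s.length - pos := by simpa using hlen2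
        -- the slice before the bold marker
        have hsl1 : PySem.List.slice s (some (pos : Int)) (some ((pos : Int) + (i : Int)))
            = (s.drop pos).take i := by
          rw [show ((pos : Int) + (i : Int)) = ((pos + i : Nat) : Int) by push_cast; ring]
          rw [PySem.List.slice_natCast]
          congr 1
          omega
        -- second find
        have hbe : (pos : Int) + (i : Int) + 2 = ((pos + i + 2 : Nat) : Int) := by push_cast; ring
        rw [hbe, PySem.Chars.findFrom_natCast s ['*','*'] (pos + i + 2) (by omega)]
        have hsfx : s.drop (pos + i + 2) = (s.drop pos).drop (i + 2) := by
          rw [List.drop_drop]; ring_nf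
        rw [hsfx]
        by_cases hf2 : PySem.Chars.find ((s.drop pos).drop (i + 2)) ['*','*'] = -1
        · simp only [hf2, if_true]
          have hiT : (PySem.Chars.find (s.drop pos) ['*','*']).toNat = i := by rw [hi]; simp
          rw [splitRef_eq_find]
          rw [hiT, hi]
          simp only [show ¬((i:Int) = -1) from by omega, if_false]
          rw [splitRef_eq_find ((s.drop pos).drop (i + 2))]
          simp only [hf2, if_true]
          have hsl2 : PySem.List.slice s (some ((pos : Int) + (i : Int))) none
              = (s.drop pos).drop i := by
            rw [show ((pos : Int) + (i : Int)) = ((pos + i : Nat) : Int) by push_cast; ring]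
            rw [PySem.List.slice_from_natCast]
            rw [List.drop_drop]
          have hC : (s.drop pos).drop i = '*' :: '*' :: List.drop (pos + (i + 2)) s := by
            rw [hdec, List.drop_drop]
          rw [segParts]
          by_cases hi0 : 0 < i
          · rw [if_pos (show ((pos:Int) < (pos:Int) + (i:Int)) from by
              exact_mod_cast Nat.lt_add_of_pos_right hi0)]
            simp [hsl1, hsl2, hC, (take_ne_nil_iff htne i).2 hi0]
          · have hi00 : i = 0 := by omega
            subst hi00
            rw [if_neg (show ¬ ((pos:Int) < (pos:Int) + ((0:Nat):Int)) from by push_cast; omega)]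
            have hC' : List.drop pos s = '*' :: '*' :: List.drop (pos + 2) s := by simpa using hC
            simp [hsl2, hC', take_ne_nil_iff htne]
        · -- closed bold: recurse
          obtain ⟨j, hj⟩ : ∃ j : Nat,
              PySem.Chars.find ((s.drop pos).drop (i+2)) ['*','*'] = (j : Int) := by
            have := PySem.Chars.neg_one_le_find ((s.drop pos).drop (i+2)) ['*','*']
            exact ⟨_, (Int.toNat_of_nonneg (by omega)).symm⟩
          have hjT : (PySem.Chars.find ((s.drop pos).drop (i+2)) ['*','*']).toNat = j := by
            rw [hj]; simp
          obtain ⟨hdec2, hlen3⟩ := find_prefix_decomp hj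
          have hiT : (PySem.Chars.find (s.drop pos) ['*','*']).toNat = i := by rw [hi]; simp
          have hlen4 : j + 2 ≤ s.length - pos - (i+2) := by
            have hLL := hlen3
            simp at hLL
            omega
          simp only [hf2, if_false]
          rw [hj]
          rw [if_neg (show ¬ (((pos+i+2:Nat) : Int) + (j:Int) = -1) from by push_cast; omega)]
          have hslB : PySem.Chars.slice s (some ((pos+i+2 : Nat) : Int))
                (some (((pos+i+2:Nat):Int) + (j:Int)))
              = ((s.drop pos).drop (i+2)).take j := by
            rw [show (((pos+i+2:Nat):Int) + (j:Int)) = ((pos+i+2+j : Nat) : Int) by push_cast; ring]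
            rw [PySem.Chars.slice_eq_listSlice, PySem.List.slice_natCast, hsfx]
            congr 1
            omega
          have hidx : ((((pos+i+2:Nat)) : Int) + (j:Int) + 2).toNat = pos+i+j+4 := by omega
          rw [hidx]
          have hrec := ih s (pos+i+j+4) -- applied below to whatever parts2 is
          have hdrop3 : s.drop (pos+i+j+4) = (((s.drop pos).drop (i+2)).drop (j+2)) := by
            rw [List.drop_drop, List.drop_drop]
            congr 1
            omega
          rw [splitRef_eq_find (s.drop pos), hiT, hi]
          rw [if_neg (show ¬ ((i:Int) = -1) from by omega)]
          rw [splitRef_eq_find ((s.drop pos).drop (i+2)), hjT, hj]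
          rw [if_neg (show ¬ ((j:Int) = -1) from by omega)]
          obtain ⟨a, rest, hsr⟩ :=
            List.exists_cons_of_ne_nil (splitRef_ne_nil (((s.drop pos).drop (i+2)).drop (j+2)))
          rw [hsr, segParts]
          by_cases hi0 : 0 < i
          · rw [if_pos (show ((pos:Int) < (pos:Int) + (i:Int)) from by
              exact_mod_cast Nat.lt_add_of_pos_right hi0)]
            by_cases hb : ((s.drop pos).drop (i+2)).take j = []
            · simp only [hslB, hb, ne_eq, not_true_eq_false, if_false]
              rw [hrec _ (by omega) (by omega), hdrop3, hsr]
              simp [hsl1, (take_ne_nil_iff htne i).2 hi0]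
            · simp only [hslB, ne_eq, hb, not_false_eq_true, if_true]
              rw [hrec _ (by omega) (by omega), hdrop3, hsr]
              simp [hsl1, (take_ne_nil_iff htne i).2 hi0]
          · have hi00 : i = 0 := by omega
            subst hi00
            rw [if_neg (show ¬ ((pos:Int) < (pos:Int) + ((0:Nat):Int)) from by push_cast; omega)]
            by_cases hb : ((s.drop pos).drop (0+2)).take j = []
            · simp only [hslB, hb, ne_eq, not_true_eq_false, if_false]
              rw [hrec _ (by omega) (by omega), hdrop3, hsr]
              simp
            · simp only [hslB, ne_eq, hb, not_false_eq_true, if_true]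
              rw [hrec _ (by omega) (by omega), hdrop3, hsr]
              simp
    · have hpos : pos = s.length := by omega
      simp only [hlt, if_false]
      rw [hpos, List.drop_length]
      rw [splitRef]
      simp [segParts]

lemma mod_two_cast (a : Int) : PySem.Int.mod a 2 = a % 2 :=
  PySem.Int.mod_eq_emod_of_pos (by omega)

lemma foldB_eq (segs : List (List Char)) : ∀ (n : Int) (parts : List (String × String)),
    0 ≤ n → n % 2 = 0 →
    (PySem.List.enumerate segs n).foldl (pifB_step (n + segs.length - 1)) parts
      = parts ++ segParts segs := by
  have hsingle : ∀ (t : List Char) (n : Int) (parts : List (String × String)),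
      0 ≤ n → n % 2 = 0 →
      (PySem.List.enumerate [t] n).foldl (pifB_step (n + ([t] : List (List Char)).length - 1)) parts
        = parts ++ segParts [t] := by
    intro t n parts hn hm
    have hm1 : ¬ (PySem.Int.mod n 2 = 1) := by rw [mod_two_cast]; omega
    simp only [PySem.List.enumerate_cons, PySem.List.enumerate_nil,
      List.foldl_cons, List.foldl_nil]
    rw [segParts, pifB_step,
      if_neg (by intro hc; obtain ⟨h1, _⟩ := hc; exact hm1 h1), if_neg hm1]
    split_ifs with h1 <;> simp [h1]
  induction segs using segParts.induct with
  | case1 => intro n parts hn hm; simp [segParts]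
  | case2 t _ => exact hsingle t
  | case3 t _ => exact hsingle t
  | case4 s0 r =>
    intro n parts hn hm
    have hm1 : ¬ (PySem.Int.mod n 2 = 1) := by rw [mod_two_cast]; omega
    have hm2 : PySem.Int.mod (n+1) 2 = 1 := by rw [mod_two_cast]; omega
    simp only [PySem.List.enumerate_cons, PySem.List.enumerate_nil,
      List.foldl_cons, List.foldl_nil]
    rw [segParts]
    rw [show pifB_step (n + ([s0, r] : List (List Char)).length - 1) parts (n, s0)
        = (if s0 ≠ [] then parts ++ [("normal", String.ofList s0)] else parts) from by
      rw [pifB_step,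
        if_neg (by intro hc; obtain ⟨h1, _⟩ := hc; exact hm1 h1), if_neg hm1]]
    rw [show ∀ p, pifB_step (n + ([s0, r] : List (List Char)).length - 1) p (n+1, r)
        = p ++ [("normal", String.ofList ('*' :: '*' :: r))] from by
      intro p
      rw [pifB_step, if_pos ⟨hm2, by simp only [List.length_cons, List.length_nil]; push_cast; ring⟩]]
    split_ifs <;> simp
  | case5 s0 s1 s2 segs ih =>
    intro n parts hn hm
    have hm1 : ¬ (PySem.Int.mod n 2 = 1) := by rw [mod_two_cast]; omega
    have hm2 : PySem.Int.mod (n+1) 2 = 1 := by rw [mod_two_cast]; omega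
    have hm3 : (n + 2) % 2 = 0 := by omega
    rw [show PySem.List.enumerate (s0 :: s1 :: s2 :: segs) n
        = (n, s0) :: (n+1, s1) :: PySem.List.enumerate (s2 :: segs) (n+1+1) from by
      rw [PySem.List.enumerate_cons, PySem.List.enumerate_cons]]
    simp only [List.foldl_cons]
    rw [segParts]
    have hlast : (n + (s0 :: s1 :: s2 :: segs : List (List Char)).length - 1 : Int)
        = (n + 2) + (s2 :: segs : List (List Char)).length - 1 := by
      simp
      ring
    rw [hlast]
    rw [show pifB_step ((n+2) + (s2 :: segs : List (List Char)).length - 1) parts (n, s0)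
        = (if s0 ≠ [] then parts ++ [("normal", String.ofList s0)] else parts) from by
      rw [pifB_step,
        if_neg (by intro hc; obtain ⟨h1, _⟩ := hc; exact hm1 h1), if_neg hm1]]
    rw [show ∀ p, pifB_step ((n+2) + (s2 :: segs : List (List Char)).length - 1) p (n+1, s1)
        = (if s1 ≠ [] then p ++ [("bold", String.ofList s1)] else p) from by
      intro p
      have hne2 : ¬ ((n + 1 : Int) = (n+2) + ((s2 :: segs : List (List Char)).length : Int) - 1) := by
        have : (1:Int) ≤ ((s2 :: segs : List (List Char)).length : Int) := by
          simp only [List.length_cons]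
          push_cast
          omega
        omega
      rw [pifB_step, if_neg (by intro hc; exact hne2 hc.2), if_pos hm2]]
    rw [show ((n:Int) + 1 + 1) = n + 2 from by ring]
    rw [ih (n+2) _ (by omega) hm3]
    split_ifs <;> simp

-- ===== VERDICT (by name: the statement is the Claim_ definition above) =====
theorem parse_inline_formatting_spec : Claim_equal_parse_inline_formatting := by
  intro text _
  unfold Spec_parse_inline_formatting parse_inline_formatting parse_inline_formatting_alt
  rw [pifA_go_eq (text.toList.length + 1) text.toList 0 [] (by omega) (by omega)]
  rw [splitOn_eq_splitRef]
  have h := foldB_eq (splitRef text.toList) 0 [] (by omega) (by decide)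
  simpa using h.symm
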